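-- pv_equiv track=rewrite | github.com/N-Ry/ModelConverter | utils/RectBoxUVAligner.py | place_rectangles
-- ===== SOURCE A (Python) =====
-- def place_rectangles(L, rectangles):
--     # 元インデックスを保持して、高さ・幅の降順にソート
--     indexed_rects = list(enumerate(rectangles))
--     indexed_rects.sort(key=lambda r: (-r[1][1], -r[1][0]))
--
--     x = 0
--     y = 0
--     shelf_height = 0
--     placed_positions = {}
--
--     for idx, (w, h) in indexed_rects:
--         if x + w <= L:
--             placed_positions[idx] = (x, y)
--             x += w
--             shelf_height = max(shelf_height, h)
--         else:
--             y += shelf_height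
--             if y + h > L:
--                 return None  # 入りきらない
--             x = 0
--             shelf_height = h
--             placed_positions[idx] = (x, y)
--             x += w
--
--     # 出力を元インデックス順に復元
--     result = [placed_positions[i] for i in range(len(rectangles))]
--     return result
-- ===== SOURCE B (Python) =====
-- def place_rectangles(L, rectangles):
--     indexed = sorted(enumerate(rectangles), key=lambda r: (-r[1][1], -r[1][0]))
--
--     # cut the sorted sequence into shelves by running width;
--     # the bottom shelf is open from the start and may stay empty
--     shelves = [[]]
--     x = 0
--     for idx, (w, h) in indexed:
--         if x + w > L:
--             shelves.append([])
--             x = 0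
--         shelves[-1].append((idx, w, h))
--         x += w
--
--     def shelf_height(shelf):
--         return shelf[0][2] if shelf else 0
--
--     pos = {}
--
--     def lay(shelf, y):
--         x = 0
--         for idx, w, h in shelf:
--             pos[idx] = (x, y)
--             x += w
--
--     # stack the shelves bottom-up: the bottom shelf sits at y = 0,
--     # every shelf stacked above it must end at or below L
--     bottom, rest = shelves[0], shelves[1:]
--     lay(bottom, 0)
--     y = shelf_height(bottom)
--     for shelf in rest:
--         h = shelf_height(shelf)
--         if y + h > L:
--             return None
--         lay(shelf, y)
--         y += h
--     return [pos[idx] for idx in range(len(rectangles))]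
-- ===== Notes on version B (the rewrite author's own statement) =====
-- stated objective: alternative
-- what changed: A fuses shelf formation, overflow checking and coordinate assignment into one stateful loop over the sorted rectangles; B first cuts the sorted list into shelves by running width and then stacks the shelves in a second pass (bottom shelf at y=0, each stacked shelf checked against L), using each shelf's first (tallest) rectangle as its height. Pre_ excludes lists of two or more rectangles all of negative height, where A's first-shelf height max(0,h) clamp is accidental and B uses the actual (negative) tallest height.
-- outside the precondition, e.g. on place_rectangles(10, [(6, -1), (6, -2)]): A returns [(0, 0), (0, 0)], B returns [(0, 0), (0, -1)]
import Mathlib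
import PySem

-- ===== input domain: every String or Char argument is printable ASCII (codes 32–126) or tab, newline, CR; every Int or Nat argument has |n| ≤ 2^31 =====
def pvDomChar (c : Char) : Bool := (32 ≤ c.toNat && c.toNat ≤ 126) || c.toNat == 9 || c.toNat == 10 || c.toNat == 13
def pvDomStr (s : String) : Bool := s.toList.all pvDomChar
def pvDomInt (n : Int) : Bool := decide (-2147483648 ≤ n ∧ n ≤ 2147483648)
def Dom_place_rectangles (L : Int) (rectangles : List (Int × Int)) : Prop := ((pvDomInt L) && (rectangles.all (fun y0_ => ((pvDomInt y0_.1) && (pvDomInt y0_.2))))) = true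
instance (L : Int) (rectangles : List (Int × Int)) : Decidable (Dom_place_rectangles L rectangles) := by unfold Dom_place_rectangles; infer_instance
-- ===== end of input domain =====

-- B replaces A's single stateful placement loop by a two-pass shelf decomposition
-- (cut the sorted rectangles into shelves, then stack the shelves); objective: alternative.

-- ===== PORT A =====
-- the main for-loop of A: state (x, y, shelf_height, placed_positions); none = "return None"
def pvLoopA (L : Int) : List (Int × Int × Int) → Int → Int → Int → PySem.Dict Int (Int × Int) → Option (PySem.Dict Int (Int × Int))
  | [], _x, _y, _sh, d => some d
  | (idx, w, h) :: rest, x, y, sh, d =>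
    if x + w ≤ L then
      pvLoopA L rest (x + w) y (max sh h) (d.insert idx (x, y))
    else if y + sh + h > L then none
    else pvLoopA L rest w (y + sh) h (d.insert idx (0, y + sh))

def place_rectangles (L : Int) (rectangles : List (Int × Int)) : Option (List (Int × Int)) :=
  match pvLoopA L (PySem.List.sorted2 (PySem.List.enumerate rectangles) (fun r => -r.2.2) (fun r => -r.2.1)) 0 0 0 PySem.Dict.empty with
  | none => none
  | some placed =>
      -- placed_positions[i] never raises KeyError: every original index was inserted, so .getD's default is unused
      some ((PySem.List.pyRange 0 (rectangles.length : Int) 1).map (fun i => (placed.get? i).getD (0, 0)))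

-- ===== PORT B =====
-- pass 1 of B: cut the sorted rectangles into shelves by running width.
-- Source B's shelves list always ends with the currently open shelf, so the port carries
-- it as (done, cur) with shelves = done ++ [cur]; the bottom shelf may stay empty.
def pvCut (L : Int) : List (Int × Int × Int) → List (List (Int × Int × Int)) → List (Int × Int × Int) → Int → List (List (Int × Int × Int))
  | [], done, cur, _x => done ++ [cur]
  | (idx, w, h) :: rest, done, cur, x =>
    if L < x + w then pvCut L rest (done ++ [cur]) [(idx, w, h)] w
    else pvCut L rest done (cur ++ [(idx, w, h)]) (x + w)

-- Source B's shelf_height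
def pvShelfHeight : List (Int × Int × Int) → Int
  | [] => 0
  | r :: _ => r.2.2

-- Source B's lay: place one shelf at height y, x = running width
def pvLay : List (Int × Int × Int) → Int → Int → PySem.Dict Int (Int × Int) → PySem.Dict Int (Int × Int)
  | [], _x, _y, pos => pos
  | (idx, w, _h) :: rest, x, y, pos => pvLay rest (x + w) y (pos.insert idx (x, y))

-- pass 2 of B, the for-loop over the shelves above the bottom one
def pvStack (L : Int) : List (List (Int × Int × Int)) → Int → PySem.Dict Int (Int × Int) → Option (PySem.Dict Int (Int × Int))
  | [], _y, pos => some pos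
  | shelf :: rest, y, pos =>
    if L < y + pvShelfHeight shelf then none
    else pvStack L rest (y + pvShelfHeight shelf) (pvLay shelf 0 y pos)

-- Source B's `shelves` binding (pass 1 applied to the sorted, enumerated input)
def pvShelves (L : Int) (rectangles : List (Int × Int)) : List (List (Int × Int × Int)) :=
  pvCut L (PySem.List.sorted2 (PySem.List.enumerate rectangles) (fun r => -r.2.2) (fun r => -r.2.1)) [] [] 0

def place_rectangles_alt (L : Int) (rectangles : List (Int × Int)) : Option (List (Int × Int)) :=
  match pvStack L (pvShelves L rectangles).tail (pvShelfHeight ((pvShelves L rectangles).headD [])) (pvLay ((pvShelves L rectangles).headD []) 0 0 PySem.Dict.empty) with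
  | none => none
  | some pos =>
      some ((PySem.List.pyRange 0 (rectangles.length : Int) 1).map (fun i => (pos.get? i).getD (0, 0)))

-- ===== PRECONDITION & SPEC =====
-- Pre_ excludes inputs with two or more rectangles ALL of negative height — degenerate input no
-- caller would specify, on which A's first shelf keeps the accidental initial shelf height 0
-- (max(0, h)) while B uses the tallest rectangle's (negative) height; both are equally defensible.
def Pre_place_rectangles (L : Int) (rectangles : List (Int × Int)) : Prop :=
  rectangles.length ≤ 1 ∨ ∃ r ∈ rectangles, 0 ≤ r.2
instance (L : Int) (rectangles : List (Int × Int)) : Decidable (Pre_place_rectangles L rectangles) := by unfold Pre_place_rectangles; infer_instance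

def pvWitness_place_rectangles : Int × (List (Int × Int)) := (10, [(4, 3), (5, 2), (7, 2), (1, 1)])

def Spec_place_rectangles (L : Int) (rectangles : List (Int × Int)) (out : Option (List (Int × Int))) : Prop := out = place_rectangles_alt L rectangles
instance (L : Int) (rectangles : List (Int × Int)) (out : Option (List (Int × Int))) : Decidable (Spec_place_rectangles L rectangles out) := by unfold Spec_place_rectangles; infer_instance

-- ===== CLAIM (what is proved, stated in full; the proofs are below) =====
def Claim_equal_place_rectangles : Prop := ∀ (L : Int) (rectangles : List (Int × Int)), Dom_place_rectangles L rectangles → Pre_place_rectangles L rectangles → Spec_place_rectangles L rectangles (place_rectangles L rectangles)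

-- ===== LEMMAS AND PROOFS =====

-- ghost: A's loop emitting the (index, position) pairs it inserts, in order
def pvLoopP (L : Int) : List (Int × Int × Int) → Int → Int → Int → Option (List (Int × (Int × Int)))
  | [], _x, _y, _sh => some []
  | (idx, w, h) :: rest, x, y, sh =>
    if x + w ≤ L then
      (pvLoopP L rest (x + w) y (max sh h)).map (fun ps => (idx, (x, y)) :: ps)
    else if y + sh + h > L then none
    else (pvLoopP L rest w (y + sh) h).map (fun ps => (idx, (0, y + sh)) :: ps)

def pvIns (d : PySem.Dict Int (Int × Int)) (p : Int × (Int × Int)) : PySem.Dict Int (Int × Int) :=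
  d.insert p.1 p.2

def pvWSum (l : List (Int × Int × Int)) : Int := (l.map (fun r => r.2.1)).sum

-- "lay the open shelf of a shelf list at y, then stack the rest": B's pass 2 seen from an open shelf
def pvStackOpen (L : Int) (shelves : List (List (Int × Int × Int))) (y : Int) (pos : PySem.Dict Int (Int × Int)) : Option (PySem.Dict Int (Int × Int)) :=
  pvStack L shelves.tail (y + pvShelfHeight (shelves.headD [])) (pvLay (shelves.headD []) 0 y pos)

lemma pvLoopA_eq_loopP (L : Int) : ∀ (s : List (Int × Int × Int)) (x y sh : Int) (d : PySem.Dict Int (Int × Int)),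
    pvLoopA L s x y sh d = (pvLoopP L s x y sh).map (fun ps => ps.foldl pvIns d) := by
  intro s
  induction s with
  | nil => intro x y sh d; simp [pvLoopA, pvLoopP]
  | cons r rest ih =>
    intro x y sh d
    obtain ⟨idx, w, h⟩ := r
    simp only [pvLoopA, pvLoopP]
    split_ifs with h1 h2
    · rw [ih]; cases pvLoopP L rest (x + w) y (max sh h) <;> simp [pvIns]
    · rfl
    · rw [ih]; cases pvLoopP L rest w (y + sh) h <;> simp [pvIns]

lemma pvLay_append : ∀ (a b : List (Int × Int × Int)) (x y : Int) (d : PySem.Dict Int (Int × Int)),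
    pvLay (a ++ b) x y d = pvLay b (x + pvWSum a) y (pvLay a x y d) := by
  intro a
  induction a with
  | nil => intro b x y d; simp [pvLay, pvWSum]
  | cons r a' ih =>
    intro b x y d
    obtain ⟨idx, w, h⟩ := r
    simp only [List.cons_append, pvLay]
    rw [ih]
    have hx : x + pvWSum ((idx, w, h) :: a') = (x + w) + pvWSum a' := by
      simp [pvWSum]; ring
    rw [hx]

lemma pvCut_accum (L : Int) : ∀ (s : List (Int × Int × Int)) (done : List (List (Int × Int × Int))) (cur : List (Int × Int × Int)) (x : Int),
    pvCut L s done cur x = done ++ pvCut L s [] cur x := by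
  intro s
  induction s with
  | nil => intro done cur x; simp [pvCut]
  | cons r rest ih =>
    intro done cur x
    obtain ⟨idx, w, h⟩ := r
    simp only [pvCut]
    split_ifs with h1
    · rw [ih (done ++ [cur]), ih ([] ++ [cur])]; simp
    · exact ih done _ _

lemma pvCut_head (L : Int) : ∀ (s cur : List (Int × Int × Int)) (x : Int),
    ∃ a rows', pvCut L s [] cur x = (cur ++ a) :: rows' := by
  intro s
  induction s with
  | nil => intro cur x; exact ⟨[], [], by simp [pvCut]⟩
  | cons r rest ih =>
    intro cur x
    obtain ⟨idx, w, h⟩ := r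
    simp only [pvCut]
    split_ifs with h1
    · exact ⟨[], pvCut L rest [] [(idx, w, h)] w, by rw [pvCut_accum]; simp⟩
    · obtain ⟨a, rows', heq⟩ := ih (cur ++ [(idx, w, h)]) (x + w)
      exact ⟨(idx, w, h) :: a, rows', by rw [heq]; simp⟩

lemma pvStackOpen_cut (L : Int) :
    ∀ (s : List (Int × Int × Int)) (c : Int × Int × Int) (cs : List (Int × Int × Int))
      (y : Int) (d : PySem.Dict Int (Int × Int)),
    ((c :: cs) ++ s).Pairwise (fun a b => b.2.2 ≤ a.2.2) →
    pvStackOpen L (pvCut L s [] (c :: cs) (pvWSum (c :: cs))) y d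
      = (pvLoopP L s (pvWSum (c :: cs)) y c.2.2).map
          (fun ps => ps.foldl pvIns (pvLay (c :: cs) 0 y d)) := by
  intro s
  induction s with
  | nil =>
    intro c cs y d _hpw
    simp [pvCut, pvStackOpen, pvStack, pvLoopP]
  | cons r rest ih =>
    intro c cs y d hpw
    obtain ⟨i, w, h⟩ := r
    have hpw' : (c :: (cs ++ (i, w, h) :: rest)).Pairwise (fun a b => b.2.2 ≤ a.2.2) := by
      simpa using hpw
    rcases List.pairwise_cons.mp hpw' with ⟨hc, htail⟩
    have hhr : h ≤ c.2.2 := by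
      have := hc (i, w, h) (by simp)
      simpa using this
    simp only [pvCut]
    by_cases hfit : pvWSum (c :: cs) + w ≤ L
    · rw [if_neg (not_lt.mpr hfit)]
      have hws : pvWSum (c :: cs) + w = pvWSum (c :: (cs ++ [(i, w, h)])) := by
        simp [pvWSum]; ring
      have hcons : (c :: cs) ++ [(i, w, h)] = c :: (cs ++ [(i, w, h)]) := by simp
      rw [hcons, hws]
      rw [ih c (cs ++ [(i, w, h)]) y d (by simpa using hpw')]
      simp only [pvLoopP]
      rw [if_pos hfit, max_eq_left hhr]
      rw [← hcons, pvLay_append]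
      have hws2 : pvWSum ((c :: cs) ++ [(i, w, h)]) = pvWSum (c :: cs) + w := by
        simp [pvWSum]; ring
      rw [hws2]
      cases pvLoopP L rest (pvWSum (c :: cs) + w) y c.2.2 <;>
        simp [pvIns, pvLay]
    · rw [if_pos (not_le.mp hfit)]
      rw [pvCut_accum]
      obtain ⟨a, rows', h1⟩ := pvCut_head L rest [(i, w, h)] w
      rw [h1]
      simp only [List.nil_append, pvStackOpen, List.headD_cons, List.tail_cons, pvStack,
        List.singleton_append, pvShelfHeight]
      simp only [pvLoopP]
      rw [if_neg hfit]
      by_cases hbad : L < y + c.2.2 + h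
      · rw [if_pos hbad, if_pos (by omega)]
        simp
      · rw [if_neg hbad, if_neg (by omega)]
        have hpw1 : (((i, w, h) :: ([] : List (Int × Int × Int))) ++ rest).Pairwise
            (fun a b => b.2.2 ≤ a.2.2) := by
          have hsub : ((i, w, h) :: rest).Pairwise (fun a b => b.2.2 ≤ a.2.2) :=
            htail.sublist (List.sublist_append_right _ _)
          simpa using hsub
        have hthis := ih (i, w, h) [] (y + c.2.2) (pvLay (c :: cs) 0 y d) hpw1
        rw [show pvWSum [(i, w, h)] = w from by simp [pvWSum]] at hthis
        simp only [pvStackOpen, h1, List.headD_cons, List.tail_cons, List.singleton_append,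
          pvShelfHeight] at hthis
        rw [hthis]
        cases pvLoopP L rest w (y + c.2.2) h <;>
          simp [pvIns, pvLay]

lemma pvSorted2_eq_sorted_lex (xs : List (Int × Int × Int)) (k1 k2 : (Int × Int × Int) → Int) :
    PySem.List.sorted2 xs k1 k2
      = PySem.List.sorted xs (fun r => (toLex (k1 r, k2 r) : Lex (Int × Int))) := by
  rw [PySem.List.sorted_eq_foldl_insertBy]
  unfold PySem.List.sorted2
  have hb : (fun (a b : Int × Int × Int) =>
        (decide (k1 a < k1 b) || (!decide (k1 b < k1 a) && decide (k2 a < k2 b))))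
      = (fun a b => decide ((toLex (k1 a, k2 a) : Lex (Int × Int)) < toLex (k1 b, k2 b))) := by
    funext a b
    by_cases h1 : k1 a < k1 b <;> by_cases h2 : k1 b < k1 a <;> by_cases h3 : k2 a < k2 b <;>
      simp [h1, h2, h3, Prod.Lex.lt_iff] <;> omega
  simp only [Bool.false_eq_true, if_false, hb]

lemma pvSorted_pairwise_heights (rectangles : List (Int × Int)) :
    (PySem.List.sorted2 (PySem.List.enumerate rectangles)
        (fun r => -r.2.2) (fun r => -r.2.1)).Pairwise (fun a b => b.2.2 ≤ a.2.2) := by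
  rw [pvSorted2_eq_sorted_lex]
  refine (PySem.List.sorted_pairwise (PySem.List.enumerate rectangles)
      (fun r => (toLex (-r.2.2, -r.2.1) : Lex (Int × Int)))).imp ?_
  intro a b hab
  rw [Prod.Lex.le_iff] at hab
  rcases hab with hlt | ⟨heq, -⟩
  · simp only [ofLex_toLex] at hlt
    omega
  · simp only [ofLex_toLex] at heq
    omega

theorem place_rectangles_spec : Claim_equal_place_rectangles := by
  intro L rects _hdom hpre
  unfold Spec_place_rectangles place_rectangles place_rectangles_alt pvShelves
  rcases hpre with hlen | ⟨r, hrmem, hrh⟩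
  · -- at most one rectangle: both programs trivially agree (the shelf height is never reused)
    match rects, hlen with
    | [], _ => rfl
    | [(w0, h0)], _ =>
      have hsort : PySem.List.sorted2 (PySem.List.enumerate [(w0, h0)])
          (fun r => -r.2.2) (fun r => -r.2.1) = [((0 : Int), w0, h0)] := by
        simp [PySem.List.sorted2, PySem.List.enumerate_cons, PySem.List.enumerate_nil,
          PySem.List.insertBy]
      rw [hsort]
      by_cases hw : w0 ≤ L
      · have hA : pvLoopA L [((0 : Int), w0, h0)] 0 0 0 PySem.Dict.empty
            = some (PySem.Dict.empty.insert 0 (0, 0)) := by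
          simp only [pvLoopA]
          rw [if_pos (by omega)]
        have hB : pvCut L [((0 : Int), w0, h0)] [] [] 0 = [[((0 : Int), w0, h0)]] := by
          simp only [pvCut]
          rw [if_neg (by omega)]
          simp
        rw [hA, hB]
        simp [pvStack, pvShelfHeight, pvLay]
      · have hA : pvCut L [((0 : Int), w0, h0)] [] [] 0 = [[], [((0 : Int), w0, h0)]] := by
          simp only [pvCut]
          rw [if_pos (by omega)]
          simp [pvCut]  -- reduces the recursive call on the tail
        rw [hA]
        simp only [List.tail_cons, List.headD_cons, pvShelfHeight, pvLay, pvStack, pvLoopA]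
        rw [if_neg (by omega)]
        by_cases hbad : L < 0 + h0
        · rw [if_pos (by omega : (0:Int) + 0 + h0 > L), if_pos hbad]
        · rw [if_neg (by omega : ¬ (0:Int) + 0 + h0 > L), if_neg hbad]
          simp [pvStack, pvShelfHeight, pvLay]
  have hpw := pvSorted_pairwise_heights rects
  have hperm := PySem.List.sorted2_perm (PySem.List.enumerate rects)
    (fun r => -r.2.2) (fun r => -r.2.1) false
  generalize hsl : PySem.List.sorted2 (PySem.List.enumerate rects)
    (fun r => -r.2.2) (fun r => -r.2.1) = s
  rw [hsl] at hpw hperm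
  cases s with
  | nil =>
    exfalso
    have hne : rects ≠ [] := by rintro rfl; simp at hrmem
    have := hperm.length_eq
    simp [PySem.List.length_enumerate] at this
    exact hne (List.eq_nil_of_length_eq_zero this.symm)
  | cons r0 tail =>
    obtain ⟨i0, w0, h0⟩ := r0
    -- h0 is the maximal height, and some rectangle has nonnegative height, so 0 ≤ h0
    have h0nn : 0 ≤ h0 := by
      obtain ⟨k, hk, hkr⟩ := List.mem_iff_getElem.mp hrmem
      have hmem : ((k : Int), r) ∈ PySem.List.enumerate rects := by
        rw [PySem.List.mem_enumerate_iff]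
        exact ⟨k, hk, by simp [hkr]⟩
      have hmem' : ((k : Int), r) ∈ (i0, w0, h0) :: tail := hperm.mem_iff.mpr hmem
      rcases List.mem_cons.mp hmem' with heq | htl
      · have : r.2 = h0 := by
          have := congrArg (fun p => p.2.2) heq
          simpa using this
        omega
      · have := (List.pairwise_cons.mp hpw).1 _ htl
        simp only at this
        omega
    have hmain := pvStackOpen_cut L tail (i0, w0, h0) [] 0 PySem.Dict.empty (by simpa using hpw)
    rw [show pvWSum [(i0, w0, h0)] = w0 from by simp [pvWSum]] at hmain
    obtain ⟨a, rows', hhead⟩ := pvCut_head L tail [(i0, w0, h0)] w0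
    rw [hhead] at hmain
    simp only [pvStackOpen, List.headD_cons, List.tail_cons, List.singleton_append,
      pvShelfHeight] at hmain
    rw [show pvLay [(i0, w0, h0)] 0 0 PySem.Dict.empty
          = PySem.Dict.empty.insert i0 (0, 0) from by simp [pvLay]] at hmain
    rw [show (0 : Int) + h0 = h0 from by ring] at hmain
    by_cases hw : w0 ≤ L
    · -- first rectangle joins the bottom shelf at x = 0 in both programs
      have hA : pvLoopA L ((i0, w0, h0) :: tail) 0 0 0 PySem.Dict.empty
          = pvLoopA L tail w0 0 h0 (PySem.Dict.empty.insert i0 (0, 0)) := by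
        simp only [pvLoopA]
        rw [if_pos (by omega)]
        norm_num [max_eq_right h0nn]
      have hB : pvCut L ((i0, w0, h0) :: tail) [] [] 0 = pvCut L tail [] [(i0, w0, h0)] w0 := by
        simp only [pvCut]
        rw [if_neg (by omega)]
        norm_num
      rw [hA, hB, hhead, pvLoopA_eq_loopP]
      simp only [List.tail_cons, List.headD_cons, List.singleton_append, pvShelfHeight]
      rw [hmain]
    · -- first rectangle is wider than the strip: it opens a shelf above the (empty) bottom shelf
      have hB : pvCut L ((i0, w0, h0) :: tail) [] [] 0
          = [] :: pvCut L tail [] [(i0, w0, h0)] w0 := by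
        simp only [pvCut]
        rw [if_pos (by omega), pvCut_accum]
        simp
      rw [hB, hhead]
      simp only [List.tail_cons, List.headD_cons, List.singleton_append, pvShelfHeight, pvLay]
      simp only [pvStack, pvShelfHeight]
      by_cases hbad : L < 0 + h0
      · rw [if_pos hbad]
        have hA : pvLoopA L ((i0, w0, h0) :: tail) 0 0 0 PySem.Dict.empty = none := by
          simp only [pvLoopA]
          rw [if_neg (by omega), if_pos (by omega)]
        rw [hA]
      · rw [if_neg hbad]
        have hA : pvLoopA L ((i0, w0, h0) :: tail) 0 0 0 PySem.Dict.empty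
            = pvLoopA L tail w0 0 h0 (PySem.Dict.empty.insert i0 (0, 0)) := by
          simp only [pvLoopA]
          rw [if_neg (by omega), if_neg (by omega)]
          norm_num
        rw [hA, pvLoopA_eq_loopP]
        rw [show (0 : Int) + h0 = h0 from by ring, hmain]
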